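-- pv_equiv track=rewrite | github.com/ohiayame/School_python | today/21_mission.py | num_msg
-- ===== SOURCE A (Python) =====
-- sentence = """pos pos hello  bar
-- foo bar foo pos kin pos
-- test test pos"""
--
-- def len_(m):
--     c = 0
--     for _ in m:
--         c += 1
--     return c
--
-- def num_msg(msg):
--     li = [] # 위치
--     m = ""  # 단어
--     n = 0   # 줄
--     for i in range(len_(sentence)):
--         # 위치: i는 현제 위치, 해당단어의 길이(공백은 빼고)를 빼고 개행 1번당 더하기 2
--         if (sentence[i] == " " and m == msg) or (sentence[i] == "\n" and m == msg) :
--             l = (i - (len_(m)) + (2 * n))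
--             li.append(l)
--         # 공백이나 개행이 있을 경우에는 초기화, 개행 수를 세우기
--         if sentence[i] == "\n" or sentence[i] == " ":
--             if sentence[i] == "\n":
--                 n += 1
--             m = ""
--         else:
--             m += sentence[i]
--     # 마지막꺼 확인
--     if m == msg:
--         l = i - (len_(m)-1)+ (2 * n)
--         li.append(l)
--     return li, n
-- ===== SOURCE B (Python) =====
-- sentence = """pos pos hello  bar
-- foo bar foo pos kin pos
-- test test pos"""
--
-- def num_msg(msg):
--     lines = sentence.split("\n")
--     li = []
--     offset = 0  # byte offset of the start of the current line within sentence
--     for ln, line in enumerate(lines):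
--         col = 0
--         for tok in line.split(" "):
--             if tok == msg:
--                 li.append(offset + col + 2 * ln)
--             col += len(tok) + 1
--         offset += len(line) + 1
--     return li, len(lines) - 1
-- ===== Notes on version B (the rewrite author's own statement) =====
-- stated objective: simpler
-- what changed: A scans the fixed sentence character by character, rebuilding each word in an accumulator and recounting its length with a hand-rolled len_ loop; B splits the sentence into lines and each line into space-separated tokens, emitting offset+col+2*ln per token equal to msg in one structured pass.
import Mathlib
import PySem

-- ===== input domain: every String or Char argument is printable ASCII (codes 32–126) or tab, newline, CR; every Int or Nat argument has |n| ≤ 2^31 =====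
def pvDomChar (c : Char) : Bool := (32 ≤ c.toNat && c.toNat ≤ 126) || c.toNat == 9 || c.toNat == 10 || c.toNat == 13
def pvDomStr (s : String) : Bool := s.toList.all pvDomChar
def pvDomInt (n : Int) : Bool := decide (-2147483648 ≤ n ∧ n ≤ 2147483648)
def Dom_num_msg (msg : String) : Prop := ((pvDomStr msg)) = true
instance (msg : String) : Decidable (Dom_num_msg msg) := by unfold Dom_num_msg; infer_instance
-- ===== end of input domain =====

-- B replaces A's character-by-character scan of the fixed sentence (rebuilding each word and
-- counting characters with a hand-rolled len_) by splitting the sentence into lines and each line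
-- into space-separated tokens, emitting offset+col+2*ln per matching token; objective: simpler.

-- the module-level constant `sentence`
def pvSentence : String := "pos pos hello  bar\nfoo bar foo pos kin pos\ntest test pos"

-- ===== PORT A =====
-- port of the helper len_ (counts elements with an explicit loop)
def pvLen_ (m : List Char) : Int := m.foldl (fun c _ => c + 1) 0

-- A's scan; Python strings are handled on the List Char side (String ↔ List Char), so the word
-- accumulator m is a List Char and `m == msg` is `m = l` with l = msg.toList
def pvScanA (l : List Char) : List Int × Int :=
  let cs := pvSentence.toList
  -- for i in range(len_(sentence)): sentence[i]  — fold over the characters paired with their index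
  let st := cs.zipIdx.foldl (fun (st : List Int × List Char × Int) (p : Char × Nat) =>
      let li := st.1; let m := st.2.1; let n := st.2.2
      let c := p.1; let i : Int := (p.2 : Int)
      let li := if (c = ' ' ∧ m = l) ∨ (c = '\n' ∧ m = l) then li ++ [i - pvLen_ m + 2*n] else li
      if c = '\n' ∨ c = ' ' then (li, [], if c = '\n' then n+1 else n) else (li, m ++ [c], n)
      ) ([], [], 0)
  -- after the loop Python's i is the last index, len_(sentence) - 1 (the sentence is non-empty)
  let i : Int := pvLen_ pvSentence.toList - 1
  let li := if st.2.1 = l then st.1 ++ [i - (pvLen_ st.2.1 - 1) + 2*st.2.2] else st.1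
  (li, st.2.2)

def num_msg (msg : String) : List Int × Int := pvScanA msg.toList

-- ===== PORT B =====
-- B's line/token decomposition: sentence.split("\n") and line.split(" ") are PySem.Chars.splitOn
def pvLinesB (l : List Char) : List Int × Int :=
  let lines := PySem.Chars.splitOn pvSentence.toList ['\n']
  let st := (PySem.List.enumerate lines).foldl
    (fun (acc : List Int × Int) (p : Int × List Char) =>
      -- acc = (li, offset); inner fold over the tokens carries (li, col)
      let inner := ((PySem.Chars.splitOn p.2 [' ']).foldl
        (fun (ac : List Int × Int) tok =>
          ((if tok = l then ac.1 ++ [acc.2 + ac.2 + 2*p.1] else ac.1), ac.2 + (tok.length : Int) + 1))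
        (acc.1, 0) : List Int × Int)
      (inner.1, acc.2 + (p.2.length : Int) + 1)) ([], 0)
  (st.1, (lines.length : Int) - 1)

def num_msg_alt (msg : String) : List Int × Int := pvLinesB msg.toList

-- ===== PRECONDITION & SPEC =====
def Spec_num_msg (msg : String) (out : List Int × Int) : Prop := out = num_msg_alt msg
instance (msg : String) (out : List Int × Int) : Decidable (Spec_num_msg msg out) := by unfold Spec_num_msg; infer_instance

-- ===== CLAIM (what is proved, stated in full; the proofs are below) =====
def Claim_equal_num_msg : Prop := ∀ (msg : String), Dom_num_msg msg → Spec_num_msg msg (num_msg msg)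

-- ===== LEMMAS AND PROOFS =====

-- if msg is none of the seven distinct tokens of the sentence, A's scan returns ([], 2)
lemma pvScanA_other (l : List Char) (h1 : ¬ (['p','o','s'] = l)) (h2 : ¬ (['h','e','l','l','o'] = l))
    (h3 : ¬ (([] : List Char) = l)) (h4 : ¬ (['b','a','r'] = l)) (h5 : ¬ (['f','o','o'] = l))
    (h6 : ¬ (['k','i','n'] = l)) (h7 : ¬ (['t','e','s','t'] = l)) :
    pvScanA l = ([], 2) := by
  simp [pvScanA, pvSentence, pvLen_, h1, h2, h3, h4, h5, h6, h7]

-- and so does B's line/token pass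
lemma pvLinesB_other (l : List Char) (h1 : ¬ (['p','o','s'] = l)) (h2 : ¬ (['h','e','l','l','o'] = l))
    (h3 : ¬ (([] : List Char) = l)) (h4 : ¬ (['b','a','r'] = l)) (h5 : ¬ (['f','o','o'] = l))
    (h6 : ¬ (['k','i','n'] = l)) (h7 : ¬ (['t','e','s','t'] = l)) :
    pvLinesB l = ([], 2) := by
  have hs : PySem.Chars.splitOn pvSentence.toList ['\n'] =
      [['p','o','s',' ','p','o','s',' ','h','e','l','l','o',' ',' ','b','a','r'],
       ['f','o','o',' ','b','a','r',' ','f','o','o',' ','p','o','s',' ','k','i','n',' ','p','o','s'],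
       ['t','e','s','t',' ','t','e','s','t',' ','p','o','s']] := by decide
  have t1 : PySem.Chars.splitOn ['p','o','s',' ','p','o','s',' ','h','e','l','l','o',' ',' ','b','a','r'] [' '] =
      [['p','o','s'], ['p','o','s'], ['h','e','l','l','o'], [], ['b','a','r']] := by decide
  have t2 : PySem.Chars.splitOn ['f','o','o',' ','b','a','r',' ','f','o','o',' ','p','o','s',' ','k','i','n',' ','p','o','s'] [' '] =
      [['f','o','o'], ['b','a','r'], ['f','o','o'], ['p','o','s'], ['k','i','n'], ['p','o','s']] := by decide
  have t3 : PySem.Chars.splitOn ['t','e','s','t',' ','t','e','s','t',' ','p','o','s'] [' '] =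
      [['t','e','s','t'], ['t','e','s','t'], ['p','o','s']] := by decide
  simp [pvLinesB, hs, t1, t2, t3, PySem.List.enumerate, h1, h2, h3, h4, h5, h6, h7]

-- the scan and the line/token pass agree on every word
lemma pvScanA_eq_pvLinesB (l : List Char) : pvScanA l = pvLinesB l := by
  by_cases h1 : ['p','o','s'] = l
  · subst h1; decide
  by_cases h2 : ['h','e','l','l','o'] = l
  · subst h2; decide
  by_cases h3 : ([] : List Char) = l
  · subst h3; decide
  by_cases h4 : ['b','a','r'] = l
  · subst h4; decide
  by_cases h5 : ['f','o','o'] = l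
  · subst h5; decide
  by_cases h6 : ['k','i','n'] = l
  · subst h6; decide
  by_cases h7 : ['t','e','s','t'] = l
  · subst h7; decide
  rw [pvScanA_other l h1 h2 h3 h4 h5 h6 h7, pvLinesB_other l h1 h2 h3 h4 h5 h6 h7]

-- ===== VERDICT (by name: the statement is the Claim_ definition above) =====
theorem num_msg_spec : Claim_equal_num_msg := by
  intro msg _
  unfold Spec_num_msg num_msg num_msg_alt
  exact pvScanA_eq_pvLinesB msg.toList
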